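-- pv_equiv track=rewrite | github.com/esaari1/adventofcode | 2016/day7.py | checkLine2
-- ===== SOURCE A (Python) =====
-- def checkLine2(line):
-- 	aba = []
-- 	bab = []
-- 	inBracket = False
--
-- 	for idx in range(len(line) - 2):
-- 		if line[idx] == '[':
-- 			inBracket = True
-- 		elif line[idx] == ']':
-- 			inBracket = False
-- 		else:
-- 			s = line[idx:idx+3]
-- 			if s[0] == s[2]:
-- 				if inBracket:
-- 					bab.append(s)
-- 				else:
-- 					aba.append(s)
-- 	for a in aba:
-- 		for b in bab:
-- 			if a[0] == b[1] and a[1] == b[0]: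
-- 				return 1
-- 	return 0
-- ===== SOURCE B (Python) =====
-- def checkLine2(line):
--     aba = set()
--     bab = set()
--     inBracket = False
--     for idx in range(len(line) - 2):
--         c = line[idx]
--         if c == '[':
--             inBracket = True
--         elif c == ']':
--             inBracket = False
--         elif c == line[idx + 2]:
--             if inBracket:
--                 bab.add((line[idx + 1], c))
--             else:
--                 aba.add((c, line[idx + 1]))
--     return 1 if aba & bab else 0
-- ===== Notes on version B (the rewrite author's own statement) =====
-- stated objective: alternative
-- what changed: A collects aba/bab triples as strings and then runs a nested list-vs-list scan looking for a complementary pair; B instead stores (first,middle) pairs in two hash sets (bab pre-swapped) during the same single scan and finishes with one set-intersection test, removing the quadratic matching pass.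
import Mathlib
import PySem

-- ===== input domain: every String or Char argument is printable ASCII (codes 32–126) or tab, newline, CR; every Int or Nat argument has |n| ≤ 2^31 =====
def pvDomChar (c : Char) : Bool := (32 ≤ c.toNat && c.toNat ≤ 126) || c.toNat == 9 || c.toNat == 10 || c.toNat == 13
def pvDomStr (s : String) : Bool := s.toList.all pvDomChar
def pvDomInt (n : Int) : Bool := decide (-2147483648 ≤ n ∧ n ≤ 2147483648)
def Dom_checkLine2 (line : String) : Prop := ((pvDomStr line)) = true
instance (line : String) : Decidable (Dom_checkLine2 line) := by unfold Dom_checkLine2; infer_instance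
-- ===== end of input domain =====

-- B replaces A's nested aba-list-vs-bab-list matching pass by two sets of (first,middle)
-- pairs (bab stored pre-swapped) filled in the same single scan, finished by one
-- set-intersection test (alternative algorithm; measured speed-ups on generated inputs hovered around the 1.5x bar, so no speed claim is made).

-- ===== PORT A =====
-- the window line[idx:idx+3]
def checkLine2_window (line : String) (idx : Int) : String :=
  PySem.Str.slice line (some idx) (some (idx + 3))

-- one iteration of A's first loop; state = (aba, bab, inBracket)
def checkLine2_step (line : String) (st : List String × List String × Bool) (idx : Int) :
    List String × List String × Bool :=
  if PySem.Str.pyGet? line idx == some '[' then (st.1, st.2.1, true)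
  else if PySem.Str.pyGet? line idx == some ']' then (st.1, st.2.1, false)
  else
    if PySem.Str.pyGet? (checkLine2_window line idx) 0 ==
        PySem.Str.pyGet? (checkLine2_window line idx) 2 then
      if st.2.2 then (st.1, st.2.1 ++ [checkLine2_window line idx], st.2.2)
      else (st.1 ++ [checkLine2_window line idx], st.2.1, st.2.2)
    else st

-- A's second, nested loop with its early 'return 1' (inner 'for b in bab' as List.any)
def checkLine2_scan (bab : List String) : List String → Int
  | [] => 0
  | a :: rest =>
      if bab.any (fun b => PySem.Str.pyGet? a 0 == PySem.Str.pyGet? b 1 &&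
          PySem.Str.pyGet? a 1 == PySem.Str.pyGet? b 0) then 1
      else checkLine2_scan bab rest

def checkLine2 (line : String) : Int :=
  let st := (PySem.List.pyRange 0 (PySem.Str.len line - 2) 1).foldl
      (checkLine2_step line) ([], [], false)
  checkLine2_scan st.2.1 st.1

-- ===== PORT B =====
-- line[i] for an index of B's loop; every index B uses is in range (0 ≤ idx ≤ len-3),
-- so the ' ' default of getD is never reached — pyGet? is Python-exact there.
def checkLine2_altGet (line : String) (i : Int) : Char :=
  (PySem.Str.pyGet? line i).getD ' '

-- one iteration of B's single loop; state = (aba set, bab set (pairs pre-swapped), inBracket)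
def checkLine2_alt_step (line : String)
    (st : PySem.Set (Char × Char) × PySem.Set (Char × Char) × Bool) (idx : Int) :
    PySem.Set (Char × Char) × PySem.Set (Char × Char) × Bool :=
  if checkLine2_altGet line idx == '[' then (st.1, st.2.1, true)
  else if checkLine2_altGet line idx == ']' then (st.1, st.2.1, false)
  else if checkLine2_altGet line idx == checkLine2_altGet line (idx + 2) then
    if st.2.2 then
      (st.1, PySem.Set.add st.2.1 (checkLine2_altGet line (idx + 1), checkLine2_altGet line idx),
       st.2.2)
    else
      (PySem.Set.add st.1 (checkLine2_altGet line idx, checkLine2_altGet line (idx + 1)),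
       st.2.1, st.2.2)
  else st

def checkLine2_alt (line : String) : Int :=
  let st := (PySem.List.pyRange 0 (PySem.Str.len line - 2) 1).foldl
      (checkLine2_alt_step line) ([], [], false)
  if (PySem.Set.inter st.1 st.2.1).isEmpty then 0 else 1

-- ===== PRECONDITION & SPEC =====
def Spec_checkLine2 (line : String) (out : Int) : Prop := out = checkLine2_alt line
instance (line : String) (out : Int) : Decidable (Spec_checkLine2 line out) := by
  unfold Spec_checkLine2; infer_instance

-- ===== CLAIM (what is proved, stated in full; the proofs are below) =====
def Claim_equal_checkLine2 : Prop := ∀ (line : String), Dom_checkLine2 line → Spec_checkLine2 line (checkLine2 line)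

-- ===== LEMMAS AND PROOFS =====

-- invariant linking A's triple lists with B's pair sets
def checkLine2_Rel (p : List String × List String × Bool)
    (q : PySem.Set (Char × Char) × PySem.Set (Char × Char) × Bool) : Prop :=
  p.2.2 = q.2.2 ∧
  (∀ x y : Char, (x, y) ∈ q.1 ↔ ∃ s ∈ p.1, s.toList = [x, y, x]) ∧
  (∀ x y : Char, (x, y) ∈ q.2.1 ↔ ∃ s ∈ p.2.1, s.toList = [y, x, y]) ∧
  (∀ s ∈ p.1, ∃ x y, s.toList = [x, y, x]) ∧
  (∀ s ∈ p.2.1, ∃ x y, s.toList = [x, y, x])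

lemma checkLine2_window3 (cs : List Char) (k : Nat) (h : k + 2 < cs.length) :
    (cs.drop k).take 3 = [cs[k], cs[k + 1], cs[k + 2]] := by
  rw [List.drop_eq_getElem_cons (by omega), List.drop_eq_getElem_cons (by omega),
      List.drop_eq_getElem_cons (by omega)]
  rfl

lemma checkLine2_get3 (s : String) (x y z : Char) (h : s.toList = [x, y, z]) :
    PySem.Str.pyGet? s 0 = some x ∧ PySem.Str.pyGet? s 1 = some y ∧
    PySem.Str.pyGet? s 2 = some z := by
  refine ⟨?_, ?_, ?_⟩ <;>
    simp [PySem.Str.pyGet?_eq, PySem.Chars.pyGet?_eq_listPyGet?, h,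
      PySem.List.pyGet?, PySem.List.pyIdx?]

lemma checkLine2_step_rel (line : String) (idx : Int) (h0 : 0 ≤ idx)
    (h2 : idx + 2 < (line.toList.length : Int)) (p q) (h : checkLine2_Rel p q) :
    checkLine2_Rel (checkLine2_step line p idx) (checkLine2_alt_step line q idx) := by
  obtain ⟨k, rfl⟩ : ∃ k : Nat, idx = (k : Int) := ⟨idx.toNat, (Int.toNat_of_nonneg h0).symm⟩
  obtain ⟨aba, bab, iA⟩ := p
  obtain ⟨sa, sb, iB⟩ := q
  obtain ⟨hi, hA, hB, shA, shB⟩ := h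
  have hib : iA = iB := hi
  subst hib
  have hk2 : k + 2 < line.toList.length := by omega
  have e0 : PySem.Str.pyGet? line (k : Int) = some line.toList[k] := by
    rw [PySem.Str.pyGet?_natCast]; exact List.getElem?_eq_getElem (by omega)
  have e1 : PySem.Str.pyGet? line ((k : Int) + 1) = some line.toList[k + 1] := by
    rw [show ((k : Int) + 1) = ((k + 1 : Nat) : Int) by push_cast; ring, PySem.Str.pyGet?_natCast]
    exact List.getElem?_eq_getElem (by omega)
  have e2 : PySem.Str.pyGet? line ((k : Int) + 2) = some line.toList[k + 2] := by
    rw [show ((k : Int) + 2) = ((k + 2 : Nat) : Int) by push_cast; ring, PySem.Str.pyGet?_natCast]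
    exact List.getElem?_eq_getElem (by omega)
  have g0 : checkLine2_altGet line (k : Int) = line.toList[k] := by
    rw [checkLine2_altGet, e0]; rfl
  have g1 : checkLine2_altGet line ((k : Int) + 1) = line.toList[k + 1] := by
    rw [checkLine2_altGet, e1]; rfl
  have g2 : checkLine2_altGet line ((k : Int) + 2) = line.toList[k + 2] := by
    rw [checkLine2_altGet, e2]; rfl
  have ew : (checkLine2_window line (k : Int)).toList =
      [line.toList[k], line.toList[k + 1], line.toList[k + 2]] := by
    rw [checkLine2_window, PySem.Str.toList_slice, PySem.Chars.slice_eq_listSlice,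
      show ((k : Int) + 3) = ((k : Int) + ((3 : Nat) : Int)) by norm_num,
      PySem.List.slice_natCast_add]
    exact checkLine2_window3 line.toList k hk2
  obtain ⟨w0, -, w2⟩ := checkLine2_get3 _ _ _ _ ew
  rw [checkLine2_step, checkLine2_alt_step, e0, g0, g1, g2, w0, w2]
  simp only [show ∀ a b : Char, (some a == some b) = (a == b) from fun a b => rfl]
  cases h1 : (line.toList[k] == ('[' : Char)) with
  | true => exact ⟨rfl, hA, hB, shA, shB⟩
  | false =>
  cases h2 : (line.toList[k] == (']' : Char)) with
  | true => exact ⟨rfl, hA, hB, shA, shB⟩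
  | false =>
  cases hcb : (line.toList[k] == line.toList[k + 2]) with
  | false => exact ⟨rfl, hA, hB, shA, shB⟩
  | true =>
  have hc : line.toList[k] = line.toList[k + 2] := by simpa using hcb
  simp only [reduceIte]
  cases iA with
  | true =>
      simp only [Bool.false_eq_true, reduceIte]
      refine ⟨rfl, hA, ?_, shA, ?_⟩
      · intro x y
        rw [PySem.Set.mem_add]
        constructor
        · rintro (hmem | hpair)
          · obtain ⟨s, hs, hst⟩ := (hB x y).1 hmem
            exact ⟨s, List.mem_append_left _ hs, hst⟩
          · obtain ⟨rfl, rfl⟩ := Prod.mk.injEq .. ▸ hpair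
            exact ⟨checkLine2_window line (k : Int),
              List.mem_append_right _ (List.mem_singleton.2 rfl), by rw [ew, ← hc]⟩
        · rintro ⟨s, hs, hst⟩
          rcases List.mem_append.1 hs with hs | hs
          · exact Or.inl ((hB x y).2 ⟨s, hs, hst⟩)
          · rw [List.mem_singleton.1 hs, ew, ← hc] at hst
            obtain ⟨rfl, rfl, -⟩ := List.cons.injEq .. ▸ (List.cons.injEq .. ▸ hst).2
            exact Or.inr rfl
      · intro s hs
        rcases List.mem_append.1 hs with hs | hs
        · exact shB s hs
        · exact ⟨line.toList[k], line.toList[k + 1],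
            by rw [List.mem_singleton.1 hs, ew, ← hc]⟩
  | false =>
      simp only [Bool.false_eq_true, reduceIte]
      refine ⟨rfl, ?_, hB, ?_, shB⟩
      · intro x y
        rw [PySem.Set.mem_add]
        constructor
        · rintro (hmem | hpair)
          · obtain ⟨s, hs, hst⟩ := (hA x y).1 hmem
            exact ⟨s, List.mem_append_left _ hs, hst⟩
          · obtain ⟨rfl, rfl⟩ := Prod.mk.injEq .. ▸ hpair
            exact ⟨checkLine2_window line (k : Int),
              List.mem_append_right _ (List.mem_singleton.2 rfl), by rw [ew, ← hc]⟩
        · rintro ⟨s, hs, hst⟩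
          rcases List.mem_append.1 hs with hs | hs
          · exact Or.inl ((hA x y).2 ⟨s, hs, hst⟩)
          · rw [List.mem_singleton.1 hs, ew, ← hc] at hst
            obtain ⟨rfl, rfl, -⟩ := List.cons.injEq .. ▸ hst
            exact Or.inr rfl
      · intro s hs
        rcases List.mem_append.1 hs with hs | hs
        · exact shA s hs
        · exact ⟨line.toList[k], line.toList[k + 1],
            by rw [List.mem_singleton.1 hs, ew, ← hc]⟩

lemma checkLine2_fold_rel (line : String) (idxs : List Int)
    (hb : ∀ i ∈ idxs, 0 ≤ i ∧ i + 2 < (line.toList.length : Int)) (p q)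
    (h : checkLine2_Rel p q) :
    checkLine2_Rel (idxs.foldl (checkLine2_step line) p)
      (idxs.foldl (checkLine2_alt_step line) q) := by
  induction idxs generalizing p q with
  | nil => exact h
  | cons i rest ih =>
      exact ih (fun j hj => hb j (by simp [hj])) _ _
        (checkLine2_step_rel line i (hb i (by simp)).1 (hb i (by simp)).2 p q h)

lemma checkLine2_scan_eq (bab aba : List String) :
    checkLine2_scan bab aba =
      if aba.any (fun a => bab.any (fun b =>
          PySem.Str.pyGet? a 0 == PySem.Str.pyGet? b 1 &&
          PySem.Str.pyGet? a 1 == PySem.Str.pyGet? b 0)) then 1 else 0 := by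
  induction aba with
  | nil => simp [checkLine2_scan]
  | cons a rest ih =>
      rw [checkLine2_scan, List.any_cons, ih]
      cases hp : bab.any (fun b =>
          PySem.Str.pyGet? a 0 == PySem.Str.pyGet? b 1 &&
          PySem.Str.pyGet? a 1 == PySem.Str.pyGet? b 0) with
      | true => simp
      | false => simp

lemma checkLine2_final (p : List String × List String × Bool)
    (q : PySem.Set (Char × Char) × PySem.Set (Char × Char) × Bool)
    (h : checkLine2_Rel p q) :
    checkLine2_scan p.2.1 p.1 = if (PySem.Set.inter q.1 q.2.1).isEmpty then 0 else 1 := by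
  obtain ⟨aba, bab, iA⟩ := p
  obtain ⟨sa, sb, iB⟩ := q
  obtain ⟨-, hA, hB, shA, shB⟩ := h
  have key : (aba.any fun a => bab.any fun b =>
      PySem.Str.pyGet? a 0 == PySem.Str.pyGet? b 1 &&
      PySem.Str.pyGet? a 1 == PySem.Str.pyGet? b 0) = true ↔
      ∃ pr, pr ∈ sa ∧ pr ∈ sb := by
    simp only [List.any_eq_true, Bool.and_eq_true, beq_iff_eq]
    constructor
    · rintro ⟨a, ha, b, hb, h01, h10⟩
      obtain ⟨x, y, hax⟩ := shA a ha
      obtain ⟨u, v, hbu⟩ := shB b hb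
      obtain ⟨ga0, ga1, -⟩ := checkLine2_get3 a x y x hax
      obtain ⟨gb0, gb1, -⟩ := checkLine2_get3 b u v u hbu
      rw [ga0, gb1] at h01; rw [ga1, gb0] at h10
      obtain rfl : x = v := Option.some_injective _ h01
      obtain rfl : y = u := Option.some_injective _ h10
      exact ⟨(x, y), (hA x y).2 ⟨a, ha, hax⟩, (hB x y).2 ⟨b, hb, hbu⟩⟩
    · rintro ⟨⟨x, y⟩, hsa, hsb⟩
      obtain ⟨a, ha, hax⟩ := (hA x y).1 hsa
      obtain ⟨b, hb, hbx⟩ := (hB x y).1 hsb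
      obtain ⟨ga0, ga1, -⟩ := checkLine2_get3 a x y x hax
      obtain ⟨gb0, gb1, -⟩ := checkLine2_get3 b y x y hbx
      exact ⟨a, ha, b, hb, by rw [ga0, gb1], by rw [ga1, gb0]⟩
  have hinter : (PySem.Set.inter sa sb).isEmpty = true ↔ ¬ ∃ pr, pr ∈ sa ∧ pr ∈ sb := by
    simp [PySem.Set.inter, List.isEmpty_iff, List.filter_eq_nil_iff]
  rw [checkLine2_scan_eq]
  by_cases he : ∃ pr, pr ∈ sa ∧ pr ∈ sb
  · rw [if_pos (key.2 he), if_neg (fun hc => (hinter.1 hc) he)]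
  · rw [if_neg (fun hc => he (key.1 hc)), if_pos (hinter.2 he)]

-- ===== VERDICT (by name: the statement is the Claim_ definition above) =====
theorem checkLine2_spec : Claim_equal_checkLine2 := by
  intro line _
  unfold Spec_checkLine2 checkLine2 checkLine2_alt
  simp only [PySem.Str.len_eq]
  refine checkLine2_final _ _ (checkLine2_fold_rel line _ ?_ _ _ ?_)
  · intro i hi
    rw [PySem.List.mem_pyRange_one] at hi
    exact ⟨hi.1, by omega⟩
  · refine ⟨rfl, ?_, ?_, ?_, ?_⟩ <;> simp
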